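-- pv_equiv track=rewrite | github.com/lukasz-migas/napari-plot | napari_plot/layers/region/_region_utils.py | get_default_region_type
-- ===== SOURCE A (Python) =====
-- def get_default_region_type(current_type):
--     """If all shapes in current_type are of identical shape type,
--        return this shape type, else "polygon" as lowest common
--        denominator type.
--
--     Parameters
--     ----------
--     current_type : list of str
--         list of current shape types
--
--     Returns
--     ----------
--     default_type : str
--         default shape type
--     """
--     default = "vertical"
--     if not current_type:
--         return default
--     first_type = current_type[0]
--     if all(shape_type == first_type for shape_type in current_type):
--         return first_type
--     return default
-- ===== SOURCE B (Python) =====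
-- def get_default_region_type(current_type):
--     distinct = set(current_type)
--     if len(distinct) == 1:
--         return distinct.pop()
--     return "vertical"
-- ===== Notes on version B (the rewrite author's own statement) =====
-- stated objective: idiomatic
-- what changed: Replaces the first-element-plus-all() short-circuit scan with building the set of distinct types once and branching on its cardinality (singleton set -> its element, otherwise 'vertical').
import Mathlib
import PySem

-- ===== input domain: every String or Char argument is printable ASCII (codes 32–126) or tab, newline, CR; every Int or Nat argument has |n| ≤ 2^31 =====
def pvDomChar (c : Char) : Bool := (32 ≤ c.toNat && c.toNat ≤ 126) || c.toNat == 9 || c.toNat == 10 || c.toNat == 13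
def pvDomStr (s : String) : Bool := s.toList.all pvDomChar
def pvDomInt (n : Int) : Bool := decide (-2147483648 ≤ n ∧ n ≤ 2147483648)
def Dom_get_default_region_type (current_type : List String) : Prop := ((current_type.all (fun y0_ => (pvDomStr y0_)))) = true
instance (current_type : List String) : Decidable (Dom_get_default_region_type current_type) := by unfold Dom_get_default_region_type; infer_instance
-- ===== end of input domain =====

-- B builds the set of distinct types once and branches on its cardinality (idiomatic), instead of A's first-element-plus-all() scan.

-- ===== PORT A =====
def get_default_region_type (current_type : List String) : String :=
  let dflt := "vertical"
  match current_type with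
  | [] => dflt
  | first_type :: _ =>
    if current_type.all (fun shape_type => shape_type == first_type) then first_type
    else dflt

-- ===== PORT B =====
def get_default_region_type_alt (current_type : List String) : String :=
  let distinct : PySem.Set String := PySem.Set.ofList current_type
  if PySem.Set.len distinct == 1 then distinct.headD "vertical"  -- pop() of a singleton set = its element
  else "vertical"

-- ===== PRECONDITION & SPEC =====
def Spec_get_default_region_type (current_type : List String) (out : String) : Prop := out = get_default_region_type_alt current_type
instance (current_type : List String) (out : String) : Decidable (Spec_get_default_region_type current_type out) := by unfold Spec_get_default_region_type; infer_instance

-- ===== CLAIM (what is proved, stated in full; the proofs are below) =====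
def Claim_equal_get_default_region_type : Prop := ∀ (current_type : List String), Dom_get_default_region_type current_type → Spec_get_default_region_type current_type (get_default_region_type current_type)

-- ===== LEMMAS AND PROOFS =====

-- a nodup list whose elements are all x, containing x, is [x]
theorem singleton_of_nodup_all_eq {x : String} {s : List String}
    (hn : s.Nodup) (hm : x ∈ s) (hall : ∀ y ∈ s, y = x) : s = [x] := by
  cases s with
  | nil => cases hm
  | cons a t =>
    have ha : a = x := hall a (List.mem_cons_self)
    have ht : t = [] := by
      cases t with
      | nil => rfl
      | cons b u =>
        have hb : b = x := hall b (by simp)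
        exfalso
        have : a ∉ (b :: u) := (List.nodup_cons.mp hn).1
        exact this (by simp [ha, hb])
    simp [ha, ht]

theorem get_default_region_type_eq (current_type : List String) :
    get_default_region_type current_type = get_default_region_type_alt current_type := by
  cases hct : current_type with
  | nil => rfl
  | cons x xs =>
    simp only [get_default_region_type, get_default_region_type_alt]
    set s := PySem.Set.ofList (x :: xs) with hs
    have hmemx : x ∈ s := (PySem.Set.mem_ofList _ _).mpr (by simp)
    have hnodup : s.Nodup := PySem.Set.nodup_ofList _
    by_cases hall : ∀ y ∈ x :: xs, y = x
    · have h1 : s = [x] := singleton_of_nodup_all_eq hnodup hmemx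
        (fun y hy => hall y ((PySem.Set.mem_ofList _ _).mp hy))
      have hA : (x :: xs).all (fun shape_type => shape_type == x) = true := by
        simp only [List.all_eq_true]
        intro y hy; exact beq_iff_eq.mpr (hall y hy)
      simp [hA, h1, PySem.Set.len]
    · push Not at hall
      obtain ⟨y, hy, hyx⟩ := hall
      have hmemy : y ∈ s := (PySem.Set.mem_ofList _ _).mpr hy
      have hlen : s.length ≠ 1 := by
        intro h
        obtain ⟨a, ha⟩ := List.length_eq_one_iff.mp h
        rw [ha] at hmemx hmemy
        simp only [List.mem_singleton] at hmemx hmemy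
        exact hyx (hmemy.trans hmemx.symm)
      have hA : (x :: xs).all (fun shape_type => shape_type == x) = false := by
        simp only [List.all_eq_false]
        exact ⟨y, hy, by simpa using hyx⟩
      simp only [PySem.Set.len, hA]
      simp [hlen]

-- ===== VERDICT (by name: the statement is the Claim_ definition above) =====
theorem get_default_region_type_spec : Claim_equal_get_default_region_type := by
  intro ct _
  unfold Spec_get_default_region_type
  exact get_default_region_type_eq ct
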